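-- pv_equiv track=rewrite | github.com/kelvindokhoi/A-ProgrammingTeam | Chess.py | allpossible
-- ===== SOURCE A (Python) =====
-- def allpossible(move):
--     moveset = set()
--     temp = move
--     while 'H'>=temp[0]>='A' and 8>=int(temp[1])>=1:
--         moveset.add(temp)
--         temp = chr(ord(temp[0])+1)+str(int(temp[1])+1)
--     temp = move
--     while 'H'>=temp[0]>='A' and 8>=int(temp[1])>=1:
--         moveset.add(temp)
--         temp = chr(ord(temp[0])-1)+str(int(temp[1])+1)
--     temp = move
--     while 'H'>=temp[0]>='A' and 8>=int(temp[1])>=1: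
--         moveset.add(temp)
--         temp = chr(ord(temp[0])+1)+str(int(temp[1])-1)
--     temp = move
--     while 'H'>=temp[0]>='A' and 8>=int(temp[1])>=1:
--         moveset.add(temp)
--         temp = chr(ord(temp[0])-1)+str(int(temp[1])-1)
--     return moveset
-- ===== SOURCE B (Python) =====
-- def allpossible(move):
--     # Closed-form ray lengths instead of A's walk-and-retest while loops.
--     if not ('H' >= move[0] >= 'A'):
--         return set()
--     row = int(move[1])
--     if not (8 >= row >= 1):
--         return set()
--     col = ord(move[0]) - ord('A')  # 0..7
--     result = {move}
--     for dc, dr in ((1, 1), (-1, 1), (1, -1), (-1, -1)):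
--         steps = min(7 - col if dc == 1 else col, 8 - row if dr == 1 else row - 1)
--         result |= {chr(ord('A') + col + dc * k) + str(row + dr * k) for k in range(1, steps + 1)}
--     return result
-- ===== Notes on version B (the rewrite author's own statement) =====
-- stated objective: alternative
-- what changed: A walks each diagonal with four while loops that re-parse the square string (int/ord/chr) and re-test board bounds at every step; B validates the square once, computes each ray's length in closed form (min of the distances to the board edges) and emits the squares directly with range-based set comprehensions.
import Mathlib
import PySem

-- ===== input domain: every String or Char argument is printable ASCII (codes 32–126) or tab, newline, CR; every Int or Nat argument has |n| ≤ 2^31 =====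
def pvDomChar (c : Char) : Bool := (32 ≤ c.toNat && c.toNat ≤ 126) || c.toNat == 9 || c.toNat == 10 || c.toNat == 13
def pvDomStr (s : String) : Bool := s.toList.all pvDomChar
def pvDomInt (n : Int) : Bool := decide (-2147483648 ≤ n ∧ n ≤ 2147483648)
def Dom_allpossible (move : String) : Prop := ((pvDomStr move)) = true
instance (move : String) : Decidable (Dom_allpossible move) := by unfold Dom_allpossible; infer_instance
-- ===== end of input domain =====

-- B replaces A's four walk-and-retest while loops by closed-form ray lengths and range
-- comprehensions (objective: alternative; same asymptotic cost on this fixed 8×8 board).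

-- ===== PORT A =====
-- chr(n) for an Int code; exact for 0 ≤ n < 0xD800 (here codes stay in 64..73)
def pyChr (n : Int) : Char := Char.ofNat n.toNat

-- the loop guard  'H' >= temp[0] >= 'A' and 8 >= int(temp[1]) >= 1 ;
-- none-branches are Python raises (IndexError / ValueError), excluded by Pre_
def condA (temp : String) : Bool :=
  match PySem.Str.pyGet? temp 0 with
  | none => false
  | some c =>
    if c ≤ 'H' ∧ 'A' ≤ c then
      match PySem.Str.pyGet? temp 1 with
      | none => false
      | some d =>
        match PySem.Int.ofChars? [d] with
        | none => false
        | some n => decide (8 ≥ n ∧ n ≥ 1)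
    else false

-- temp = chr(ord(temp[0])+dc) + str(int(temp[1])+dr)   (defaults unreachable: only called when condA holds)
def stepA (dc dr : Int) (temp : String) : String :=
  let c := (PySem.Str.pyGet? temp 0).getD 'A'
  let n := (PySem.Int.ofChars? [(PySem.Str.pyGet? temp 1).getD '0']).getD 0
  String.ofList (pyChr ((c.toNat : Int) + dc) :: PySem.Int.toChars (n + dr))

-- one 'while' loop: fuel 9 is enough — the row coordinate leaves 1..8 after at most 8 steps
def loopA (dc dr : Int) : Nat → PySem.Set String → String → PySem.Set String
  | 0, s, _ => s
  | fuel+1, s, temp =>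
    if condA temp then loopA dc dr fuel (PySem.Set.add s temp) (stepA dc dr temp) else s

def allpossible (move : String) : List String :=
  loopA (-1) (-1) 9 (loopA 1 (-1) 9 (loopA (-1) 1 9 (loopA 1 1 9 PySem.Set.empty move) move) move) move

-- ===== PORT B =====
def allpossible_alt (move : String) : List String :=
  match PySem.Str.pyGet? move 0 with
  | none => []  -- IndexError, excluded by Pre_
  | some c0 =>
    if c0 ≤ 'H' ∧ 'A' ≤ c0 then
      match PySem.Str.pyGet? move 1 with
      | none => []  -- IndexError, excluded by Pre_
      | some d1 =>
        match PySem.Int.ofChars? [d1] with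
        | none => []  -- ValueError, excluded by Pre_
        | some row =>
          if 8 ≥ row ∧ row ≥ 1 then
            let col : Int := (c0.toNat : Int) - 65
            [((1 : Int), (1 : Int)), (-1, 1), (1, -1), (-1, -1)].foldl
              (fun s p =>
                let steps := min (if p.1 = 1 then 7 - col else col)
                                 (if p.2 = 1 then 8 - row else row - 1)
                PySem.Set.union s ((PySem.List.pyRange 1 (steps + 1) 1).map
                  (fun k => String.ofList
                    (pyChr (65 + col + p.1 * k) :: PySem.Int.toChars (row + p.2 * k)))))
              (PySem.Set.ofList [move])
          else []
    else []

-- ===== PRECONDITION & SPEC =====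
-- Pre_ excludes exactly the inputs where Python A raises: the empty string (IndexError on
-- move[0]) and strings whose first char is in 'A'..'H' but which have no second char
-- (IndexError) or a non-digit second char (ValueError from int(move[1])).
def preB (move : String) : Bool :=
  match move.toList with
  | [] => false
  | [c] => !(decide (c ≤ 'H') && decide ('A' ≤ c))
  | c :: d :: _ => !(decide (c ≤ 'H') && decide ('A' ≤ c)) || (decide ('0' ≤ d) && decide (d ≤ '9'))

def Pre_allpossible (move : String) : Prop := preB move = true
instance (move : String) : Decidable (Pre_allpossible move) := by unfold Pre_allpossible; infer_instance

def pvWitness_allpossible : String := "D4"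

def Spec_allpossible (move : String) (out : List String) : Prop := out = allpossible_alt move
instance (move : String) (out : List String) : Decidable (Spec_allpossible move out) := by unfold Spec_allpossible; infer_instance

-- ===== CLAIM (what is proved, stated in full; the proofs are below) =====
def Claim_equal_allpossible : Prop := ∀ (move : String), Dom_allpossible move → Pre_allpossible move → Spec_allpossible move (allpossible move)

-- ===== LEMMAS AND PROOFS =====

-- the list of squares visited by one of A's while loops
def traceA (dc dr : Int) : Nat → String → List String
  | 0, _ => []
  | fuel+1, temp => if condA temp then temp :: traceA dc dr fuel (stepA dc dr temp) else []

-- stepA applied to a string with first char c and digit value row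
def stepCD (dc dr : Int) (c : Char) (row : Int) : String :=
  String.ofList (pyChr ((c.toNat : Int) + dc) :: PySem.Int.toChars (row + dr))

-- one ray of B's port, as a function of the parsed square
def rayCD (dc dr : Int) (c : Char) (row : Int) : List String :=
  let col : Int := (c.toNat : Int) - 65
  let steps := min (if dc = 1 then 7 - col else col) (if dr = 1 then 8 - row else row - 1)
  (PySem.List.pyRange 1 (steps + 1) 1).map
    (fun k => String.ofList (pyChr (65 + col + dc * k) :: PySem.Int.toChars (row + dr * k)))

lemma loopA_eq_foldl (dc dr : Int) : ∀ (fuel : Nat) (s : PySem.Set String) (temp : String),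
    loopA dc dr fuel s temp = (traceA dc dr fuel temp).foldl PySem.Set.add s := by
  intro fuel
  induction fuel with
  | zero => intro s temp; simp [loopA, traceA]
  | succ f ih =>
    intro s temp
    by_cases h : condA temp = true <;> simp [loopA, traceA, h, ih]

lemma foldl_add_cons (m : String) : ∀ (L s : List String),
    L.foldl PySem.Set.add (m :: s) = m :: (L.filter (fun x => x != m)).foldl PySem.Set.add s := by
  intro L
  induction L with
  | nil => intro s; simp
  | cons x t ih =>
    intro s
    by_cases hx : x = m
    · subst hx
      have hadd : PySem.Set.add (x :: s) x = x :: s := by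
        simp [PySem.Set.add, PySem.Set.contains]
      simp only [List.foldl, hadd, List.filter_cons, bne_self_eq_false, ih]
      simp
    · have h1 : PySem.Set.add (m :: s) x = m :: PySem.Set.add s x := by
        simp only [PySem.Set.add, PySem.Set.contains, List.contains_cons]
        have hxm : (x == m) = false := by simp [hx]
        rw [hxm]
        simp only [Bool.false_or]
        by_cases hm : x ∈ s <;> simp [hm]
      have hf : (x != m) = true := by simp [hx]
      simp only [List.foldl, h1, List.filter_cons, hf, if_true, ih]

lemma ne_all (move : String) (c : Char) (hml : move.toList.head? = some c)
    (L : List String) (hall : L.all (fun x => x.toList.head? != some c) = true) :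
    ∀ x ∈ L, (x != move) = true := by
  intro x hx
  have h := List.all_eq_true.mp hall x hx
  rw [bne_iff_ne]
  intro e
  subst e
  rw [hml] at h
  simp at h

lemma filter_eq_of_ne (move : String) (c : Char) (hml : move.toList.head? = some c)
    (L : List String) (hall : L.all (fun x => x.toList.head? != some c) = true) :
    L.filter (fun x => x != move) = L :=
  List.filter_eq_self.mpr (ne_all move c hml L hall)

lemma head?_of_pyGet0 (move : String) (c : Char) (h0 : PySem.Str.pyGet? move 0 = some c) :
    move.toList.head? = some c := by
  unfold PySem.Str.pyGet? at h0
  cases hl : move.toList with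
  | nil => rw [hl] at h0; simp [PySem.List.pyGet?, PySem.List.pyIdx?] at h0
  | cons a t =>
    rw [hl] at h0
    simp [PySem.List.pyGet?, PySem.List.pyIdx?] at h0
    simp [h0]

-- both ports, in the valid case, are 'move' followed by the same four rays
lemma master (move : String) (c d : Char) (row : Int)
    (h0 : PySem.Str.pyGet? move 0 = some c)
    (h1 : PySem.Str.pyGet? move 1 = some d)
    (hr : PySem.Int.ofChars? [d] = some row)
    (hc : c ≤ 'H' ∧ 'A' ≤ c) (hrow : 8 ≥ row ∧ row ≥ 1)
    (hallA : ((traceA 1 1 8 (stepCD 1 1 c row) ++ traceA (-1) 1 8 (stepCD (-1) 1 c row) ++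
               traceA 1 (-1) 8 (stepCD 1 (-1) c row) ++ traceA (-1) (-1) 8 (stepCD (-1) (-1) c row)).all
               (fun x => x.toList.head? != some c)) = true)
    (hallB : ((rayCD 1 1 c row ++ rayCD (-1) 1 c row ++ rayCD 1 (-1) c row ++ rayCD (-1) (-1) c row).all
               (fun x => x.toList.head? != some c)) = true)
    (heq : (traceA 1 1 8 (stepCD 1 1 c row) ++ traceA (-1) 1 8 (stepCD (-1) 1 c row) ++
            traceA 1 (-1) 8 (stepCD 1 (-1) c row) ++ traceA (-1) (-1) 8 (stepCD (-1) (-1) c row)).foldl PySem.Set.add []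
         = (rayCD 1 1 c row ++ rayCD (-1) 1 c row ++ rayCD 1 (-1) c row ++ rayCD (-1) (-1) c row).foldl PySem.Set.add []) :
    allpossible move = allpossible_alt move := by
  have hml := head?_of_pyGet0 move c h0
  have h0' : PySem.List.pyGet? move.toList 0 = some c := h0
  have h1' : PySem.List.pyGet? move.toList 1 = some d := h1
  have hcond : condA move = true := by
    simp [condA, h0', h1', hr, hc.1, hc.2, hrow.1, hrow.2]
  have hstep : ∀ dc dr : Int, stepA dc dr move = stepCD dc dr c row := by
    intro dc dr
    simp [stepA, stepCD, h0', h1', hr]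
  have htr : ∀ dc dr : Int, traceA dc dr 9 move = move :: traceA dc dr 8 (stepCD dc dr c row) := by
    intro dc dr
    rw [show (9 : Nat) = 8 + 1 from rfl]
    rw [traceA, if_pos hcond, hstep]
  -- split the two 'all' hypotheses
  rw [List.all_append, List.all_append, List.all_append, Bool.and_eq_true, Bool.and_eq_true, Bool.and_eq_true] at hallA hallB
  obtain ⟨⟨⟨hA1, hA2⟩, hA3⟩, hA4⟩ := hallA
  obtain ⟨⟨⟨hB1, hB2⟩, hB3⟩, hB4⟩ := hallB
  -- A side
  have eA : allpossible move
      = ((move :: traceA 1 1 8 (stepCD 1 1 c row)) ++ ((move :: traceA (-1) 1 8 (stepCD (-1) 1 c row)) ++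
         ((move :: traceA 1 (-1) 8 (stepCD 1 (-1) c row)) ++ (move :: traceA (-1) (-1) 8 (stepCD (-1) (-1) c row))))).foldl PySem.Set.add [] := by
    unfold allpossible
    rw [loopA_eq_foldl, loopA_eq_foldl, loopA_eq_foldl, loopA_eq_foldl, htr, htr, htr, htr]
    simp only [List.foldl_append]
    rfl
  have hadd0 : PySem.Set.add ([] : List String) move = [move] := rfl
  have eA2 : allpossible move = move :: ((traceA 1 1 8 (stepCD 1 1 c row) ++ traceA (-1) 1 8 (stepCD (-1) 1 c row) ++
      traceA 1 (-1) 8 (stepCD 1 (-1) c row) ++ traceA (-1) (-1) 8 (stepCD (-1) (-1) c row)).foldl PySem.Set.add []) := by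
    rw [eA]
    simp only [List.cons_append, List.foldl_cons, hadd0]
    rw [show ([move] : List String) = move :: [] from rfl, foldl_add_cons]
    simp only [List.filter_append, List.filter_cons, bne_self_eq_false, Bool.false_eq_true, if_false,
      filter_eq_of_ne move c hml _ hA1, filter_eq_of_ne move c hml _ hA2,
      filter_eq_of_ne move c hml _ hA3, filter_eq_of_ne move c hml _ hA4]
    simp [List.append_assoc]
  -- B side
  have eB : allpossible_alt move
      = (rayCD 1 1 c row ++ rayCD (-1) 1 c row ++ rayCD 1 (-1) c row ++ rayCD (-1) (-1) c row).foldl PySem.Set.add [move] := by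
    have hcT : (c ≤ 'H' ∧ 'A' ≤ c) = True := eq_true hc
    have hrowT : ((8:Int) ≥ row ∧ row ≥ 1) = True := eq_true hrow
    simp only [allpossible_alt, h0, h1, hr, hcT, hrowT, if_true]
    simp only [List.foldl_cons, List.foldl_nil]
    rw [show PySem.Set.ofList [move] = [move] from rfl]
    simp only [PySem.Set.union, PySem.Set.update, rayCD, List.foldl_append]
  have eB2 : allpossible_alt move = move :: ((rayCD 1 1 c row ++ rayCD (-1) 1 c row ++
      rayCD 1 (-1) c row ++ rayCD (-1) (-1) c row).foldl PySem.Set.add []) := by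
    rw [eB, show ([move] : List String) = move :: [] from rfl, foldl_add_cons]
    simp only [List.filter_append,
      filter_eq_of_ne move c hml _ hB1, filter_eq_of_ne move c hml _ hB2,
      filter_eq_of_ne move c hml _ hB3, filter_eq_of_ne move c hml _ hB4]
  rw [eA2, eB2, heq]

lemma pyGet0_of_toList (move : String) (c : Char) (rest : List Char)
    (hl : move.toList = c :: rest) : PySem.Str.pyGet? move 0 = some c := by
  unfold PySem.Str.pyGet?
  rw [show PySem.Chars.pyGet? move.toList 0 = PySem.Chars.pyGet? (c :: rest) 0 from by rw [hl]]
  simp [PySem.Chars.pyGet?, PySem.List.pyGet?, PySem.List.pyIdx?]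

lemma pyGet1_of_toList (move : String) (c d : Char) (rest : List Char)
    (hl : move.toList = c :: d :: rest) : PySem.Str.pyGet? move 1 = some d := by
  unfold PySem.Str.pyGet?
  rw [show PySem.Chars.pyGet? move.toList 1 = PySem.Chars.pyGet? (c :: d :: rest) 1 from by rw [hl]]
  simp [PySem.Chars.pyGet?, PySem.List.pyGet?, PySem.List.pyIdx?]

-- first char off the board: every loop guard of A is false at once, B returns []
lemma invalid_col (move : String) (c : Char)
    (h0 : PySem.Str.pyGet? move 0 = some c)
    (hcn : ¬(c ≤ 'H' ∧ 'A' ≤ c)) :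
    allpossible move = allpossible_alt move := by
  have h0' : PySem.List.pyGet? move.toList 0 = some c := h0
  have hcond : condA move = false := by
    rcases not_and_or.mp hcn with h | h <;> simp [condA, h0', h]
  have hT : ∀ dc dr : Int, traceA dc dr 9 move = [] := by
    intro dc dr
    rw [show (9 : Nat) = 8 + 1 from rfl]
    simp [traceA, hcond]
  have hA : allpossible move = [] := by
    unfold allpossible
    rw [loopA_eq_foldl, loopA_eq_foldl, loopA_eq_foldl, loopA_eq_foldl, hT, hT, hT, hT]
    rfl
  have hB : allpossible_alt move = [] := by
    rcases not_and_or.mp hcn with h | h <;> simp [allpossible_alt, h0', h]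
  rw [hA, hB]

-- digit gives a row outside 1..8: every loop guard of A is false at once, B returns []
lemma invalid_row (move : String) (c d : Char) (row : Int)
    (h0 : PySem.Str.pyGet? move 0 = some c)
    (h1 : PySem.Str.pyGet? move 1 = some d)
    (hr : PySem.Int.ofChars? [d] = some row)
    (hc : c ≤ 'H' ∧ 'A' ≤ c)
    (hrn : ¬(8 ≥ row ∧ row ≥ 1)) :
    allpossible move = allpossible_alt move := by
  have h0' : PySem.List.pyGet? move.toList 0 = some c := h0
  have h1' : PySem.List.pyGet? move.toList 1 = some d := h1
  have hcond : condA move = false := by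
    simp [condA, h0', h1', hr, hc.1, hc.2]
    omega
  have hT : ∀ dc dr : Int, traceA dc dr 9 move = [] := by
    intro dc dr
    rw [show (9 : Nat) = 8 + 1 from rfl]
    simp [traceA, hcond]
  have hA : allpossible move = [] := by
    unfold allpossible
    rw [loopA_eq_foldl, loopA_eq_foldl, loopA_eq_foldl, loopA_eq_foldl, hT, hT, hT, hT]
    rfl
  have hB : allpossible_alt move = [] := by
    simp [allpossible_alt, h0', h1', hr, hc.1, hc.2]
    omega
  rw [hA, hB]

lemma char_mem_files (c : Char) (hc : c ≤ 'H' ∧ 'A' ≤ c) :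
    c = 'A' ∨ c = 'B' ∨ c = 'C' ∨ c = 'D' ∨ c = 'E' ∨ c = 'F' ∨ c = 'G' ∨ c = 'H' := by
  have h1 : 65 ≤ c.toNat ∧ c.toNat ≤ 72 := ⟨hc.2, hc.1⟩
  have h2 := Char.ofNat_toNat c
  have h3 : c.toNat = 65 ∨ c.toNat = 66 ∨ c.toNat = 67 ∨ c.toNat = 68 ∨ c.toNat = 69 ∨
      c.toNat = 70 ∨ c.toNat = 71 ∨ c.toNat = 72 := by omega
  rcases h3 with h|h|h|h|h|h|h|h <;> rw [← h2, h] <;> decide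

lemma char_mem_digits (d : Char) (hd : '0' ≤ d ∧ d ≤ '9') :
    d = '0' ∨ d = '1' ∨ d = '2' ∨ d = '3' ∨ d = '4' ∨ d = '5' ∨ d = '6' ∨ d = '7' ∨ d = '8' ∨ d = '9' := by
  have h1 : 48 ≤ d.toNat ∧ d.toNat ≤ 57 := ⟨hd.1, hd.2⟩
  have h2 := Char.ofNat_toNat d
  have h3 : d.toNat = 48 ∨ d.toNat = 49 ∨ d.toNat = 50 ∨ d.toNat = 51 ∨ d.toNat = 52 ∨
      d.toNat = 53 ∨ d.toNat = 54 ∨ d.toNat = 55 ∨ d.toNat = 56 ∨ d.toNat = 57 := by omega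
  rcases h3 with h|h|h|h|h|h|h|h|h|h <;> rw [← h2, h] <;> decide

-- ===== VERDICT (by name: the statement is the Claim_ definition above) =====
set_option maxHeartbeats 3200000 in
theorem allpossible_spec : Claim_equal_allpossible := by
  unfold Claim_equal_allpossible
  intro move _ hpre
  unfold Pre_allpossible at hpre
  unfold Spec_allpossible
  cases hl : move.toList with
  | nil =>
    exfalso
    unfold preB at hpre
    rw [hl] at hpre
    simp at hpre
  | cons c rest =>
    have h0 := pyGet0_of_toList move c rest hl
    by_cases hc : c ≤ 'H' ∧ 'A' ≤ c
    · cases rest with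
      | nil =>
        exfalso
        unfold preB at hpre
        rw [hl] at hpre
        simp [hc.1, hc.2] at hpre
      | cons d rest2 =>
        have h1 := pyGet1_of_toList move c d rest2 hl
        have hd : '0' ≤ d ∧ d ≤ '9' := by
          unfold preB at hpre
          rw [hl] at hpre
          simp [hc.1, hc.2] at hpre
          exact hpre
        have hdm := char_mem_digits d hd
        rcases hdm with rfl | rfl | rfl | rfl | rfl | rfl | rfl | rfl | rfl | rfl
        · exact invalid_row move c '0' 0 h0 h1 (by decide) hc (by omega)
        · rcases char_mem_files c hc with rfl | rfl | rfl | rfl | rfl | rfl | rfl | rfl <;>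
            exact master move _ _ 1 h0 h1 (by decide) (by decide) (by omega) (by decide) (by decide) (by decide)
        · rcases char_mem_files c hc with rfl | rfl | rfl | rfl | rfl | rfl | rfl | rfl <;>
            exact master move _ _ 2 h0 h1 (by decide) (by decide) (by omega) (by decide) (by decide) (by decide)
        · rcases char_mem_files c hc with rfl | rfl | rfl | rfl | rfl | rfl | rfl | rfl <;>
            exact master move _ _ 3 h0 h1 (by decide) (by decide) (by omega) (by decide) (by decide) (by decide)
        · rcases char_mem_files c hc with rfl | rfl | rfl | rfl | rfl | rfl | rfl | rfl <;>
            exact master move _ _ 4 h0 h1 (by decide) (by decide) (by omega) (by decide) (by decide) (by decide)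
        · rcases char_mem_files c hc with rfl | rfl | rfl | rfl | rfl | rfl | rfl | rfl <;>
            exact master move _ _ 5 h0 h1 (by decide) (by decide) (by omega) (by decide) (by decide) (by decide)
        · rcases char_mem_files c hc with rfl | rfl | rfl | rfl | rfl | rfl | rfl | rfl <;>
            exact master move _ _ 6 h0 h1 (by decide) (by decide) (by omega) (by decide) (by decide) (by decide)
        · rcases char_mem_files c hc with rfl | rfl | rfl | rfl | rfl | rfl | rfl | rfl <;>
            exact master move _ _ 7 h0 h1 (by decide) (by decide) (by omega) (by decide) (by decide) (by decide)
        · rcases char_mem_files c hc with rfl | rfl | rfl | rfl | rfl | rfl | rfl | rfl <;>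
            exact master move _ _ 8 h0 h1 (by decide) (by decide) (by omega) (by decide) (by decide) (by decide)
        · exact invalid_row move c '9' 9 h0 h1 (by decide) hc (by omega)
    · exact invalid_col move c h0 hc
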